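-- pv_equiv track=rewrite | github.com/omric12/Permutations | Implementation of all 4 algorithms/Analyzing-Comparison of running times/lex.py | getListCoefficients
-- ===== SOURCE A (Python) =====
-- import math
--
-- def getListCoefficients(x, num):
--     perm_len = num
--     list = []
--     while perm_len > 0:
--         num = x // math.factorial(perm_len-1)
--         list.append(num)
--         x -= num * math.factorial(perm_len-1)
--         perm_len -= 1
--     return list
-- ===== SOURCE B (Python) =====
-- def getListCoefficients(x, num):
--     # Extract the factorial-base digits least-significant-first using divmod
--     # by the small radices 1, 2, ..., num-1 (no factorial is ever computed),
--     # then reverse; O(num) small-divisor bigint divisions.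
--     if num <= 0:
--         return []
--     digits = []
--     for r in range(1, num):
--         x, d = divmod(x, r)
--         digits.append(d)
--     digits.append(x)
--     digits.reverse()
--     return digits
-- ===== Notes on version B (the rewrite author's own statement) =====
-- stated objective: faster
-- what changed: B never computes a factorial: it extracts the digits least-significant-first by repeated divmod with the small radices 1..num-1 and reverses the list, instead of A's most-significant-first division by math.factorial(perm_len-1) recomputed each iteration.
import Mathlib
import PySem

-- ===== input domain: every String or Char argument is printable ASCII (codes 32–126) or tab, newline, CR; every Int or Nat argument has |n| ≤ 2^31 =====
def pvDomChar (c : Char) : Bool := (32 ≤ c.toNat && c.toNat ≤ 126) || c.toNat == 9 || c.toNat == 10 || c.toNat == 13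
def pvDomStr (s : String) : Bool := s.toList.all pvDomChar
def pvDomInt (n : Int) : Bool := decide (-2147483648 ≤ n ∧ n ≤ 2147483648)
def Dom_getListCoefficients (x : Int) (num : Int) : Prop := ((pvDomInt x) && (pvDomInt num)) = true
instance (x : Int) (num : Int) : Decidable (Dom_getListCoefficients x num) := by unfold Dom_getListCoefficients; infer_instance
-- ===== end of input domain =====

-- B extracts the factorial-base digits least-significant-first by divmod with the
-- small radices 1..num-1 and reverses (no factorial computed); same return value.

-- ===== PORT A =====
-- while perm_len > 0: the loop runs exactly num.toNat times (perm_len decrements by 1)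
def goA (x : Int) (permLen : Nat) (acc : List Int) : List Int :=
  match permLen with
  | 0 => acc
  | Nat.succ p =>
    let n := PySem.Int.floordiv x ((Nat.factorial p : Nat) : Int)   -- x // math.factorial(perm_len-1)
    goA (x - n * ((Nat.factorial p : Nat) : Int)) p (acc ++ [n])

def getListCoefficients (x : Int) (num : Int) : List Int := goA x num.toNat []

-- ===== PORT B =====
-- 'for r in range(1, num)': k remaining iterations, current radix r;
-- 'x, d = divmod(x, r); digits.append(d)'; at the end append x and reverse.
def goB (x : Int) (r : Nat) (k : Nat) (acc : List Int) : List Int :=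
  match k with
  | 0 => (acc ++ [x]).reverse
  | Nat.succ j =>
    goB (PySem.Int.floordiv x r) (r + 1) j (acc ++ [PySem.Int.mod x r])

def getListCoefficients_alt (x : Int) (num : Int) : List Int :=
  if num ≤ 0 then [] else goB x 1 (num.toNat - 1) []

-- ===== PRECONDITION & SPEC =====
def Spec_getListCoefficients (x : Int) (num : Int) (out : List Int) : Prop := out = getListCoefficients_alt x num
instance (x : Int) (num : Int) (out : List Int) : Decidable (Spec_getListCoefficients x num out) := by unfold Spec_getListCoefficients; infer_instance

-- ===== CLAIM =====
def Claim_equal_getListCoefficients : Prop := ∀ (x : Int) (num : Int), Dom_getListCoefficients x num → Spec_getListCoefficients x num (getListCoefficients x num)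

-- ===== LEMMAS AND PROOFS =====

-- ascending product asc r k = r * (r+1) * … * (r+k-1); asc 1 k = k!
def asc (r : Nat) : Nat → Nat
  | 0 => 1
  | Nat.succ k => r * asc (r + 1) k

theorem asc_one (k : Nat) : asc 1 k = Nat.factorial k := by
  have h : ∀ k r, asc r (k + 1) = asc r k * (r + k) := by
    intro k
    induction k with
    | zero => intro r; simp [asc]
    | succ j ih => intro r; show r * asc (r+1) (j+1) = _; rw [ih (r+1)]; simp [asc]; ring
  induction k with
  | zero => simp [asc, Nat.factorial]
  | succ j ih => rw [h j 1, ih, Nat.factorial_succ]; ring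

theorem asc_pos (r k : Nat) (hr : 1 ≤ r) : 0 < asc r k := by
  induction k generalizing r with
  | zero => simp [asc]
  | succ j ih => exact Nat.mul_pos (by omega) (ih (r+1) (by omega))

-- most-significant-first digits for radix products asc r k
def msb (x : Int) (r : Nat) : Nat → List Int
  | 0 => []
  | Nat.succ k =>
    let q := PySem.Int.floordiv x ((asc r k : Nat) : Int)
    q :: msb (x - q * ((asc r k : Nat) : Int)) r k

theorem goA_eq_msb (m : Nat) : ∀ (x : Int) (acc : List Int),
    goA x m acc = acc ++ msb x 1 m := by
  induction m with
  | zero => intro x acc; simp [goA, msb]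
  | succ p ih =>
    intro x acc
    rw [goA, ih, msb]
    simp [asc_one]

theorem fdiv_fdiv (x : Int) (a b : Nat) (ha : 0 < a) (hb : 0 < b) :
    PySem.Int.floordiv (PySem.Int.floordiv x a) b = PySem.Int.floordiv x ((a * b : Nat) : Int) := by
  rw [PySem.Int.floordiv_eq_ediv_of_pos (by exact_mod_cast ha : (0:Int) < (a:Int)),
      PySem.Int.floordiv_eq_ediv_of_pos (by exact_mod_cast hb : (0:Int) < (b:Int)),
      PySem.Int.floordiv_eq_ediv_of_pos (by positivity)]
  push_cast
  exact Int.ediv_ediv_of_nonneg (by positivity)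

theorem fdiv_sub_mul (x q c : Int) (r : Nat) (hr : 0 < r) :
    PySem.Int.floordiv (x - q * (c * r)) r = PySem.Int.floordiv x r - q * c := by
  rw [PySem.Int.floordiv_eq_ediv_of_pos (by exact_mod_cast hr),
      PySem.Int.floordiv_eq_ediv_of_pos (by exact_mod_cast hr)]
  have : x - q * (c * r) = x + (-(q * c)) * (r : Int) := by ring
  rw [this, Int.add_mul_ediv_right _ _ (by positivity : (0:Int) < (r:Int)).ne']
  ring

theorem mod_sub_mul (x q c : Int) (r : Nat) (hr : 0 < r) :
    PySem.Int.mod (x - q * (c * r)) r = PySem.Int.mod x r := by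
  have h1 := PySem.Int.floordiv_mul_add_mod (x - q * (c * r)) r
  have h2 := PySem.Int.floordiv_mul_add_mod x r
  have h3 := fdiv_sub_mul x q c r hr
  -- mod y r = y - (y fdiv r) * r
  nlinarith [h1, h2, h3]

-- peel the bottom digit off msb (needs at least two digits)
theorem msb_peel (k : Nat) : ∀ (r : Nat), 1 ≤ r → ∀ (x : Int),
    msb x r (k + 2) =
      msb (PySem.Int.floordiv x r) (r + 1) (k + 1) ++ [PySem.Int.mod x r] := by
  induction k with
  | zero =>
    intro r hr x
    have hmod : PySem.Int.mod x r = x - PySem.Int.floordiv x r * r := by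
      have := PySem.Int.floordiv_mul_add_mod x r; omega
    have h1 : ∀ y : Int, PySem.Int.floordiv y ((1:Nat):Int) = y := by
      intro y
      rw [PySem.Int.floordiv_eq_ediv_of_pos (by norm_num)]
      simp
    simp only [msb, asc, Nat.mul_one, Nat.cast_one] at *
    rw [h1, h1, hmod]
    simp
  | succ j ih =>
    intro r hr x
    have hc : 0 < asc (r + 1) (j + 1) := asc_pos _ _ (by omega)
    have hq : PySem.Int.floordiv (PySem.Int.floordiv x r) ((asc (r+1) (j+1) : Nat) : Int)
        = PySem.Int.floordiv x ((asc r (j + 2) : Nat) : Int) := by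
      rw [fdiv_fdiv x r (asc (r+1) (j+1)) (by omega) hc]
      rfl
    -- name the common top digit
    set q := PySem.Int.floordiv x ((asc r (j + 2) : Nat) : Int) with hqdef
    have hsplit : ((asc r (j + 2) : Nat) : Int) = ((asc (r+1) (j+1) : Nat) : Int) * r := by
      show (((r * asc (r+1) (j+1) : Nat)) : Int) = _
      push_cast; ring
    show (q :: msb (x - q * ((asc r (j+2) : Nat) : Int)) r (j + 2)) = _
    rw [ih r hr (x - q * ((asc r (j+2) : Nat) : Int))]
    rw [hsplit, fdiv_sub_mul x q _ r (by omega), mod_sub_mul x q _ r (by omega)]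
    simp only [msb]
    rw [hq]
    simp

theorem goB_eq_msb (k : Nat) : ∀ (r : Nat), 1 ≤ r → ∀ (x : Int) (acc : List Int),
    goB x r k acc = msb x r (k + 1) ++ acc.reverse := by
  induction k with
  | zero =>
    intro r hr x acc
    have h1 : PySem.Int.floordiv x ((1:Nat):Int) = x := by
      rw [PySem.Int.floordiv_eq_ediv_of_pos (by norm_num)]
      simp
    simp only [msb, asc]
    rw [h1]
    simp [goB]
  | succ j ih =>
    intro r hr x acc
    rw [goB, ih (r + 1) (by omega), msb_peel j r hr x]
    simp

theorem getListCoefficients_eq (x num : Int) :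
    getListCoefficients x num = getListCoefficients_alt x num := by
  unfold getListCoefficients getListCoefficients_alt
  by_cases h : num ≤ 0
  · have : num.toNat = 0 := by omega
    simp [h, this, goA]
  · rw [if_neg h, goB_eq_msb _ 1 le_rfl, goA_eq_msb]
    have : num.toNat - 1 + 1 = num.toNat := by omega
    simp [this]

-- ===== VERDICT =====
theorem getListCoefficients_spec : Claim_equal_getListCoefficients := by
  intro x num _
  exact getListCoefficients_eq x num
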